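-- pv_equiv track=rewrite | github.com/CodeFaiths/conweave-ns3 | mix/MEDUTest/02_Incast_Congestion/analyze/scripts/plot_fct.py | categorize_flows
-- ===== SOURCE A (Python) =====
-- SMALL_FLOW_THRESHOLD = 100000  # 100 KB
--
-- LARGE_FLOW_THRESHOLD = 1000000  # 1 MB
--
-- def categorize_flows(flows, small_threshold=None, large_threshold=None):
--     """Categorize flows by size."""
--     if small_threshold is None:
--         small_threshold = SMALL_FLOW_THRESHOLD
--     if large_threshold is None:
--         large_threshold = LARGE_FLOW_THRESHOLD
--
--     small_flows = [f for f in flows if f['flow_size'] < small_threshold]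
--     medium_flows = [f for f in flows if small_threshold <= f['flow_size'] < large_threshold]
--     large_flows = [f for f in flows if f['flow_size'] >= large_threshold]
--
--     return {
--         'all': flows,
--         'small': small_flows,
--         'medium': medium_flows,
--         'large': large_flows
--     }
-- ===== SOURCE B (Python) =====
-- SMALL_FLOW_THRESHOLD = 100000  # 100 KB
-- LARGE_FLOW_THRESHOLD = 1000000  # 1 MB
--
-- def categorize_flows(flows, small_threshold=None, large_threshold=None):
--     """Categorize flows by size in a single pass."""
--     if small_threshold is None:
--         small_threshold = SMALL_FLOW_THRESHOLD
--     if large_threshold is None: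
--         large_threshold = LARGE_FLOW_THRESHOLD
--     small_flows, medium_flows, large_flows = [], [], []
--     for f in flows:
--         size = f['flow_size']
--         if size < small_threshold:
--             small_flows.append(f)
--         if small_threshold <= size < large_threshold:
--             medium_flows.append(f)
--         if size >= large_threshold:
--             large_flows.append(f)
--     return {
--         'all': flows,
--         'small': small_flows,
--         'medium': medium_flows,
--         'large': large_flows
--     }
-- ===== Notes on version B (the rewrite author's own statement) =====
-- stated objective: alternative
-- what changed: Three independent list-comprehension scans over flows are replaced by one explicit loop that reads each flow's size once and appends it to the matching bucket(s), preserving A's exact (possibly overlapping) boundary conditions.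
import Mathlib
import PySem

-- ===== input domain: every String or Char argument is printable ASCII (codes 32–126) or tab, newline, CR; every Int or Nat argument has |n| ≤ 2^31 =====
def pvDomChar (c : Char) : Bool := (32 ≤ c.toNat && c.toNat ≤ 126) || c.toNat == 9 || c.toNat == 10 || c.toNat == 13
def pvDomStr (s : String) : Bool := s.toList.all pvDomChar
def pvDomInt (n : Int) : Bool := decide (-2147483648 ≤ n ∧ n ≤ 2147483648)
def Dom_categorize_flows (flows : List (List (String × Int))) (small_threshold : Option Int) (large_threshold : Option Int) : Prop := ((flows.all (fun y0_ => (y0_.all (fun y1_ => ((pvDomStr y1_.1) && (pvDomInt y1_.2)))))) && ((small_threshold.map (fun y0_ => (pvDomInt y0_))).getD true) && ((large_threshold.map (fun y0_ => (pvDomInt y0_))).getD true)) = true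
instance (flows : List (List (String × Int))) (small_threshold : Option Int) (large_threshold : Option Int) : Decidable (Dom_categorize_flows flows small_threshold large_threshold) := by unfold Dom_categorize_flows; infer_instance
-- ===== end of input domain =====

-- B replaces A's three independent list-comprehension scans by a single loop that
-- reads each flow's size once and appends it to the matching bucket(s) (alternative decomposition;
-- same boundary conditions, same return value).

-- ===== PORT A =====
-- A: three list comprehensions filtering flows, then a dict literal.
def categorize_flows (flows : List (List (String × Int))) (small_threshold : Option Int) (large_threshold : Option Int) : List (String × List (List (String × Int))) :=
  let st : Int := match small_threshold with | none => 100000 | some v => v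
  let lt : Int := match large_threshold with | none => 1000000 | some v => v
  -- f['flow_size'] raises KeyError when the key is missing; Pre_ excludes that, getD 0 is never used there
  let small_flows := flows.filter (fun f => decide (((PySem.Dict.mk f).get? "flow_size").getD 0 < st))
  let medium_flows := flows.filter (fun f => decide (st ≤ ((PySem.Dict.mk f).get? "flow_size").getD 0 ∧ ((PySem.Dict.mk f).get? "flow_size").getD 0 < lt))
  let large_flows := flows.filter (fun f => decide (((PySem.Dict.mk f).get? "flow_size").getD 0 ≥ lt))
  [("all", flows), ("small", small_flows), ("medium", medium_flows), ("large", large_flows)]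

-- ===== PORT B =====
-- B: one fold over flows carrying the three buckets.
def categorize_flows_alt (flows : List (List (String × Int))) (small_threshold : Option Int) (large_threshold : Option Int) : List (String × List (List (String × Int))) :=
  let st : Int := match small_threshold with | none => 100000 | some v => v
  let lt : Int := match large_threshold with | none => 1000000 | some v => v
  let acc := flows.foldl (fun (acc : List (List (String × Int)) × List (List (String × Int)) × List (List (String × Int))) f =>
      let size : Int := ((PySem.Dict.mk f).get? "flow_size").getD 0
      let acc := if size < st then (acc.1 ++ [f], acc.2.1, acc.2.2) else acc
      let acc := if st ≤ size ∧ size < lt then (acc.1, acc.2.1 ++ [f], acc.2.2) else acc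
      if size ≥ lt then (acc.1, acc.2.1, acc.2.2 ++ [f]) else acc)
    ([], [], [])
  [("all", flows), ("small", acc.1), ("medium", acc.2.1), ("large", acc.2.2)]

-- ===== PRECONDITION & SPEC =====
-- Pre_ excludes flows lacking the 'flow_size' key, on which both A and B raise KeyError.
def Pre_categorize_flows (flows : List (List (String × Int))) (small_threshold : Option Int) (large_threshold : Option Int) : Prop :=
  flows.all (fun f => ((PySem.Dict.mk f).get? "flow_size").isSome) = true
instance (flows : List (List (String × Int))) (small_threshold : Option Int) (large_threshold : Option Int) : Decidable (Pre_categorize_flows flows small_threshold large_threshold) := by unfold Pre_categorize_flows; infer_instance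
def pvWitness_categorize_flows : (List (List (String × Int))) × Option Int × Option Int :=
  ([[("flow_size", 50)], [("flow_size", 500000)]], none, none)

def Spec_categorize_flows (flows : List (List (String × Int))) (small_threshold : Option Int) (large_threshold : Option Int) (out : List (String × List (List (String × Int)))) : Prop := out = categorize_flows_alt flows small_threshold large_threshold
instance (flows : List (List (String × Int))) (small_threshold : Option Int) (large_threshold : Option Int) (out : List (String × List (List (String × Int)))) : Decidable (Spec_categorize_flows flows small_threshold large_threshold out) := by unfold Spec_categorize_flows; infer_instance

-- ===== CLAIM (what is proved, stated in full; the proofs are below) =====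
def Claim_equal_categorize_flows : Prop := ∀ (flows : List (List (String × Int))) (small_threshold : Option Int) (large_threshold : Option Int), Dom_categorize_flows flows small_threshold large_threshold → Pre_categorize_flows flows small_threshold large_threshold → Spec_categorize_flows flows small_threshold large_threshold (categorize_flows flows small_threshold large_threshold)

-- ===== LEMMAS AND PROOFS =====

-- the single fold with three conditional appends computes the three filters
theorem foldl3_filter (st lt : Int) (xs : List (List (String × Int)))
    (a b c : List (List (String × Int))) :
    xs.foldl (fun (acc : List (List (String × Int)) × List (List (String × Int)) × List (List (String × Int))) f =>
      (fun acc2 =>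
        (fun acc3 =>
          if ((PySem.Dict.mk f).get? "flow_size").getD 0 ≥ lt then (acc3.1, acc3.2.1, acc3.2.2 ++ [f]) else acc3)
        (if st ≤ ((PySem.Dict.mk f).get? "flow_size").getD 0 ∧ ((PySem.Dict.mk f).get? "flow_size").getD 0 < lt then (acc2.1, acc2.2.1 ++ [f], acc2.2.2) else acc2))
      (if ((PySem.Dict.mk f).get? "flow_size").getD 0 < st then (acc.1 ++ [f], acc.2.1, acc.2.2) else acc)) (a, b, c)
    = (a ++ xs.filter (fun f => decide (((PySem.Dict.mk f).get? "flow_size").getD 0 < st)),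
       b ++ xs.filter (fun f => decide (st ≤ ((PySem.Dict.mk f).get? "flow_size").getD 0 ∧ ((PySem.Dict.mk f).get? "flow_size").getD 0 < lt)),
       c ++ xs.filter (fun f => decide (((PySem.Dict.mk f).get? "flow_size").getD 0 ≥ lt))) := by
  induction xs generalizing a b c with
  | nil => simp
  | cons x xs ih =>
    simp only [List.foldl_cons, List.filter_cons]
    generalize ((PySem.Dict.mk x).get? "flow_size").getD 0 = n
    split_ifs <;> rw [ih] <;> simp only [decide_eq_true_eq] at * <;>
      first | omega | simp [*, List.append_assoc]

-- ===== VERDICT (by name: the statement is the Claim_ definition above) =====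
theorem categorize_flows_spec : Claim_equal_categorize_flows := by
  intro flows st lt _ _
  unfold Spec_categorize_flows categorize_flows categorize_flows_alt
  simp only []
  rw [foldl3_filter]
  simp
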